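-- pv_equiv track=rewrite | github.com/SSAFYnity/Job-Preparation-Challenge-5th | Programmers/후보키/후보키_황병현.py | solution
-- ===== SOURCE A (Python) =====
-- from itertools import combinations
--
-- def solution(relation):
--     columns = len(relation[0])
--     rows = len(relation)
--
--     group = []
--
--     for i in range(1,columns + 1):
--         combination = combinations(range(columns), i)
--         for y_lst in combination:
--             check = []
--             for x in range(rows):
--                 lst = []
--                 for y in y_lst:
--                     lst.append(relation[x][y])
--                 check.append(lst)
--             if len(list(set(map(tuple, check)))) == rows:
--                 group.append(set(y_lst))
--
--     group_ = group.copy()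
--     for i in range(len(group)):
--         for j in range(i+1, len(group)):
--             key1 = group[i]
--             key2 = group[j]
--             if key1.issubset(key2):
--                 try:
--                     group_.remove(key2)
--                 except:
--                     continue
--
--     return len(group_)
-- ===== SOURCE B (Python) =====
-- from itertools import combinations
--
-- def solution(relation):
--     columns = len(relation[0])
--     rows = len(relation)
--     candidates = []
--     for size in range(1, columns + 1):
--         for cols in combinations(range(columns), size):
--             projected = {tuple(row[y] for y in cols) for row in relation}
--             if len(projected) == rows and all(not set(c).issubset(cols) for c in candidates):
--                 candidates.append(cols)
--     return len(candidates)
-- ===== Notes on version B (the rewrite author's own statement) =====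
-- stated objective: simpler
-- what changed: Fused A's separate quadratic remove-phase over all unique column-sets into the single size-ascending enumeration loop: a unique subset is accepted only if no already-accepted candidate is contained in it, and len(candidates) is returned directly with no second pass.
import Mathlib
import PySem

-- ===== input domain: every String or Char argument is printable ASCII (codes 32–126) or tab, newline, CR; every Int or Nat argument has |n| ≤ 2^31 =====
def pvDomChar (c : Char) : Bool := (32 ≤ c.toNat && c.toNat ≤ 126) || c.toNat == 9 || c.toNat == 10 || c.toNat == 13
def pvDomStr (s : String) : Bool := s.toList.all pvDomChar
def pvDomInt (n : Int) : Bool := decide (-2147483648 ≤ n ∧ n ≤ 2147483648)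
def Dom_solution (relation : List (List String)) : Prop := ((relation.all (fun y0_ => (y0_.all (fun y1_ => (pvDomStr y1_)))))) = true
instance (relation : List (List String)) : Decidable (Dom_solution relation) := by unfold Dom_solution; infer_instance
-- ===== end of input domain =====

-- B fuses A's separate subset-removal phase (quadratic in the number of unique
-- column-sets) into the single size-ascending enumeration loop (accept a unique
-- column-set only if no accepted candidate is contained in it); same return value,
-- simpler one-pass structure, measurably faster on larger relations.

-- ===== PORT A =====
-- shared helper: itertools.combinations(range n, k), lexicographic order, as lists of
-- column indices (a combination is a strictly increasing list, so Python's set(y_lst)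
-- equals the list itself element-wise; set equality/issubset on such sets coincide with
-- list equality / all-membership, used below).
def combs : Nat → List Nat → List (List Nat)
  | 0, _ => [[]]
  | _+1, [] => []
  | k+1, x :: xs => (combs k xs).map (x :: ·) ++ combs (k+1) xs

-- [relation[x][y] for y in ys] for each row x; under Pre_ every y is in range, so
-- List.getD is exact (Python raises IndexError outside Pre_).
def projRow (row : List String) (ys : List Nat) : List String :=
  ys.map (fun y => row.getD y "")

-- len(set(map(tuple, check))) == rows  (both Pythons compute exactly this test)
def isUnique (relation : List (List String)) (ys : List Nat) : Bool :=
  (PySem.Set.ofList (relation.map (fun row => projRow row ys))).length == relation.length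

-- key1.issubset(key2) on strictly increasing index lists
def subk (a b : List Nat) : Bool := a.all (fun x => decide (x ∈ b))

-- phase 1 of A: collect every unique column-set, sizes 1..columns, lexicographic
def groupA (relation : List (List String)) (columns : Nat) : List (List Nat) :=
  (List.range' 1 columns).foldl (fun g i =>
    (combs i (List.range columns)).foldl (fun g2 ys =>
      if isUnique relation ys then g2 ++ [ys] else g2) g) []

-- inner loop of A's removal phase: for j in range(i+1, len(group)): … group_.remove(key2)
-- (try/except: a failed remove leaves group_ unchanged)
def removeInner (key1 : List Nat) (rest acc : List (List Nat)) : List (List Nat) :=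
  rest.foldl (fun ac key2 =>
    if subk key1 key2 then
      match PySem.List.remove? ac key2 with
      | some l => l
      | none => ac
    else ac) acc

-- outer loop over i: key1 = group[i], inner js range over the suffix after i
def removeOuter : List (List Nat) → List (List Nat) → List (List Nat)
  | [], acc => acc
  | key1 :: rest, acc => removeOuter rest (removeInner key1 rest acc)

-- relation[0] is relation.headD [] under Pre_ (relation ≠ []); A raises IndexError on []
def solution (relation : List (List String)) : Int :=
  let columns := (relation.headD []).length
  let group := groupA relation columns
  ((removeOuter group group).length : Int)

-- ===== PORT B =====
-- single pass: a unique column-set is accepted only if no already-accepted candidate is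
-- a subset of it; return len(candidates)
def solution_alt (relation : List (List String)) : Int :=
  let columns := (relation.headD []).length
  let cands := (List.range' 1 columns).foldl (fun cs i =>
    (combs i (List.range columns)).foldl (fun cs2 ys =>
      if isUnique relation ys && cs2.all (fun c => !(subk c ys)) then cs2 ++ [ys] else cs2) cs) []
  (cands.length : Int)

-- ===== PRECONDITION & SPEC =====
-- Pre_ excludes exactly the inputs where Python A raises IndexError: the empty relation
-- (relation[0]) and relations with a row shorter than the first row (relation[x][y]).
def Pre_solution (relation : List (List String)) : Prop :=
  relation ≠ [] ∧ ∀ row ∈ relation, (relation.headD []).length ≤ row.length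
instance (relation : List (List String)) : Decidable (Pre_solution relation) := by
  unfold Pre_solution; infer_instance

def pvWitness_solution : List (List String) := [["a", "b"], ["b", "b"]]

def Spec_solution (relation : List (List String)) (out : Int) : Prop := out = solution_alt relation
instance (relation : List (List String)) (out : Int) : Decidable (Spec_solution relation out) := by unfold Spec_solution; infer_instance

-- ===== CLAIM (what is proved, stated in full; the proofs are below) =====
def Claim_equal_solution : Prop := ∀ (relation : List (List String)), Dom_solution relation → Pre_solution relation → Spec_solution relation (solution relation)

-- ===== LEMMAS AND PROOFS =====

-- proof-only definitions
def enumE (c : Nat) : List (List Nat) :=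
  (List.range' 1 c).flatMap (fun i => combs i (List.range c))

def keyList (relation : List (List String)) (c : Nat) : List (List Nat) :=
  (enumE c).filter (isUnique relation)

-- "g has no strict subset anywhere in L" (minimality of a candidate key)
def keepb (L : List (List Nat)) (g : List Nat) : Bool :=
  L.all (fun y => !(subk y g) || (y == g))

def stepB (cs : List (List Nat)) (y : List Nat) : List (List Nat) :=
  if cs.all (fun c => !(subk c y)) then cs ++ [y] else cs

-- subk basics
theorem subk_iff (a b : List Nat) : subk a b = true ↔ ∀ x ∈ a, x ∈ b := by
  simp [subk]

theorem subk_refl (a : List Nat) : subk a a = true := by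
  simp [subk_iff]

theorem subk_trans {a b c : List Nat} (h1 : subk a b = true) (h2 : subk b c = true) :
    subk a c = true := by
  rw [subk_iff] at *
  exact fun x hx => h2 x (h1 x hx)

theorem keepb_iff (L : List (List Nat)) (g : List Nat) :
    keepb L g = true ↔ ∀ y ∈ L, subk y g = true → y = g := by
  simp [keepb, Bool.or_eq_true, imp_iff_not_or]

-- combinations: structural facts
theorem mem_combs_sublist : ∀ {k : Nat} {xs c : List Nat}, c ∈ combs k xs → c.Sublist xs := by
  intro k xs
  induction xs generalizing k with
  | nil =>
    intro c hc
    cases k with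
    | zero => simp [combs] at hc; simp [hc]
    | succ k => simp [combs] at hc
  | cons x xs ih =>
    intro c hc
    cases k with
    | zero => simp [combs] at hc; simp [hc]
    | succ k =>
      simp only [combs, List.mem_append, List.mem_map] at hc
      rcases hc with ⟨c', hc', rfl⟩ | hc
      · exact (ih hc').cons₂ x
      · exact (ih hc).cons x

theorem mem_combs_length : ∀ {k : Nat} {xs c : List Nat}, c ∈ combs k xs → c.length = k := by
  intro k xs
  induction xs generalizing k with
  | nil =>
    intro c hc
    cases k with
    | zero => simp [combs] at hc; simp [hc]
    | succ k => simp [combs] at hc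
  | cons x xs ih =>
    intro c hc
    cases k with
    | zero => simp [combs] at hc; simp [hc]
    | succ k =>
      simp only [combs, List.mem_append, List.mem_map] at hc
      rcases hc with ⟨c', hc', rfl⟩ | hc
      · simp [ih hc']
      · exact ih hc

theorem combs_nodup : ∀ {k : Nat} {xs : List Nat}, xs.Nodup → (combs k xs).Nodup := by
  intro k xs
  induction xs generalizing k with
  | nil =>
    intro _
    cases k with
    | zero => simp [combs]
    | succ k => simp [combs]
  | cons x xs ih =>
    intro hx
    rcases List.nodup_cons.mp hx with ⟨hxmem, hxs⟩
    cases k with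
    | zero => simp [combs]
    | succ k =>
      simp only [combs]
      apply List.Nodup.append
      · exact (ih hxs).map (fun a b h => by injection h)
      · exact ih hxs
      · intro c hc1 hc2
        rcases List.mem_map.mp hc1 with ⟨c', _, rfl⟩
        have : List.Sublist (x :: c') xs := mem_combs_sublist hc2
        exact hxmem (this.subset (List.mem_cons_self))

-- flatMap pairwise helper
theorem pairwise_flatMap {α β : Type} {R : β → β → Prop} {l : List α} {f : α → List β}
    (hin : ∀ i ∈ l, (f i).Pairwise R)
    (hcross : l.Pairwise (fun i j => ∀ x ∈ f i, ∀ y ∈ f j, R x y)) :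
    (l.flatMap f).Pairwise R := by
  induction l with
  | nil => simp
  | cons i l ih =>
    rw [List.pairwise_cons] at hcross
    simp only [List.flatMap_cons, List.pairwise_append]
    refine ⟨hin i (by simp), ih (fun j hj => hin j (by simp [hj])) hcross.2, ?_⟩
    intro x hx y hy
    rcases List.mem_flatMap.mp hy with ⟨j, hj, hyj⟩
    exact hcross.1 j hj x hx y hyj

theorem range'_pairwise_lt (s n : Nat) : (List.range' s n).Pairwise (· < ·) := by
  rw [List.range'_eq_map_range]
  exact (List.pairwise_lt_range).map _ (by omega)

theorem mem_enumE_sorted {c : Nat} {x : List Nat} (hx : x ∈ enumE c) : x.Pairwise (· < ·) := by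
  rcases List.mem_flatMap.mp hx with ⟨i, _, hxi⟩
  exact (List.pairwise_lt_range).sublist (mem_combs_sublist hxi)

theorem enumE_len_pairwise (c : Nat) :
    (enumE c).Pairwise (fun x y => x.length ≤ y.length) := by
  apply pairwise_flatMap
  · intro i _
    apply List.pairwise_of_forall_mem_list
    intro x hx y hy
    rw [mem_combs_length hx, mem_combs_length hy]
  · refine (range'_pairwise_lt 1 c).imp_of_mem ?_
    intro i j _ _ hij x hx y hy
    have h1 := mem_combs_length hx
    have h2 := mem_combs_length hy
    omega

theorem enumE_nodup (c : Nat) : (enumE c).Nodup := by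
  apply pairwise_flatMap
  · intro i _
    exact combs_nodup (List.nodup_range)
  · refine (range'_pairwise_lt 1 c).imp_of_mem ?_
    intro i j _ _ hij x hx y hy hxy
    subst hxy
    have h1 := mem_combs_length hx
    have h2 := mem_combs_length hy
    omega

-- strict subset between strictly increasing lists means strictly shorter
theorem subk_length_lt {a b : List Nat} (ha : a.Pairwise (· < ·)) (hb : b.Pairwise (· < ·))
    (hs : subk a b = true) (hne : a ≠ b) : a.length < b.length := by
  have hna : a.Nodup := ha.imp (fun h => Nat.ne_of_lt h)
  have hsp : List.Subperm a b := hna.subperm (by rw [subk_iff] at hs; exact hs)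
  rcases Nat.lt_or_ge a.length b.length with h | h
  · exact h
  · exact absurd ((hsp.perm_of_length_le h).eq_of_pairwise
      (fun _ _ _ _ h1 h2 => absurd h2 (Nat.not_lt.mpr (Nat.le_of_lt h1))) ha hb) hne

theorem subk_antisymm {a b : List Nat} (ha : a.Pairwise (· < ·)) (hb : b.Pairwise (· < ·))
    (h1 : subk a b = true) (h2 : subk b a = true) : a = b := by
  by_contra hne
  have k1 := subk_length_lt ha hb h1 hne
  have k2 := subk_length_lt hb ha h2 (Ne.symm hne)
  omega

-- order lemmas: for a list nodup, nondecreasing in length, of strictly increasing lists,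
-- a strict superset of a appears strictly after a, and a strict subset strictly before
theorem ord_after {L u1 u2 : List (List Nat)} {a b : List Nat}
    (hL : L = u1 ++ a :: u2) (_hN : L.Nodup)
    (hP : L.Pairwise (fun x y => x.length ≤ y.length))
    (hS : ∀ x ∈ L, x.Pairwise (· < ·))
    (hb : b ∈ L) (hsub : subk a b = true) (hne : a ≠ b) : b ∈ u2 := by
  have haL : a ∈ L := by rw [hL]; simp
  have hlen : a.length < b.length := subk_length_lt (hS a haL) (hS b hb) hsub hne
  rw [hL] at hb hP
  rcases List.mem_append.mp hb with h1 | h2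
  · rw [List.pairwise_append] at hP
    have := hP.2.2 b h1 a (by simp)
    omega
  · rcases List.mem_cons.mp h2 with rfl | h
    · exact absurd rfl hne
    · exact h

theorem ord_before {L u1 u2 : List (List Nat)} {a b : List Nat}
    (hL : L = u1 ++ a :: u2) (_hN : L.Nodup)
    (hP : L.Pairwise (fun x y => x.length ≤ y.length))
    (hS : ∀ x ∈ L, x.Pairwise (· < ·))
    (hb : b ∈ L) (hsub : subk b a = true) (hne : b ≠ a) : b ∈ u1 := by
  have haL : a ∈ L := by rw [hL]; simp
  have hlen : b.length < a.length := subk_length_lt (hS b hb) (hS a haL) hsub hne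
  rw [hL] at hb hP
  rcases List.mem_append.mp hb with h1 | h2
  · exact h1
  · rcases List.mem_cons.mp h2 with rfl | h
    · exact absurd rfl hne
    · rw [List.pairwise_append] at hP
      have := (List.pairwise_cons.mp hP.2.1).1 b h
      omega

-- every element of L has a minimal (kept) subset in L
theorem exists_keep {L : List (List Nat)} (hS : ∀ x ∈ L, x.Pairwise (· < ·)) :
    ∀ (n : Nat) (g : List Nat), g ∈ L → g.length ≤ n →
      ∃ c ∈ L, keepb L c = true ∧ subk c g = true := by
  intro n
  induction n with
  | zero =>
    intro g hg hlen
    by_cases hk : keepb L g = true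
    · exact ⟨g, hg, hk, subk_refl g⟩
    · rw [keepb_iff] at hk
      push_neg at hk
      rcases hk with ⟨y, hy, hsub, hne⟩
      have := subk_length_lt (hS y hy) (hS g hg) hsub hne
      omega
  | succ n ih =>
    intro g hg hlen
    by_cases hk : keepb L g = true
    · exact ⟨g, hg, hk, subk_refl g⟩
    · rw [keepb_iff] at hk
      push_neg at hk
      rcases hk with ⟨y, hy, hsub, hne⟩
      have hlt := subk_length_lt (hS y hy) (hS g hg) hsub hne
      rcases ih y hy (by omega) with ⟨c, hc, hkc, hcy⟩
      exact ⟨c, hc, hkc, subk_trans hcy hsub⟩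

-- A's inner removal loop is a filter (on a nodup accumulator)
theorem removeInner_eq (key1 : List Nat) :
    ∀ (rest acc : List (List Nat)), acc.Nodup →
      removeInner key1 rest acc
        = acc.filter (fun g => !(decide (g ∈ rest) && subk key1 g)) := by
  intro rest
  induction rest with
  | nil => intro acc _; simp [removeInner]
  | cons key2 r ih =>
    intro acc hacc
    have hstep : removeInner key1 (key2 :: r) acc
        = removeInner key1 r (if subk key1 key2 then
            (match PySem.List.remove? acc key2 with
              | some l => l
              | none => acc) else acc) := by
      simp [removeInner]
    rw [hstep]
    by_cases hk : subk key1 key2 = true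
    · have hacc1 : (match PySem.List.remove? acc key2 with
          | some l => l
          | none => acc) = acc.filter (fun g => !(g == key2)) := by
        by_cases hmem : key2 ∈ acc
        · rw [PySem.List.remove?_eq_some_erase acc key2 hmem, hacc.erase_eq_filter key2]
          simp [bne]
        · rw [(PySem.List.remove?_eq_none_iff _ _).mpr hmem]
          symm
          apply List.filter_eq_self.mpr
          intro g hg
          simp only [Bool.not_eq_eq_eq_not, Bool.not_true, beq_eq_false_iff_ne, ne_eq]
          rintro rfl; exact hmem hg
      rw [if_pos hk, hacc1, ih _ (hacc.filter _), List.filter_filter]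
      apply List.filter_congr
      intro g hg
      by_cases hgk : g = key2
      · subst hgk
        simp [hk]
      · simp [hgk]
    · rw [if_neg hk, ih _ hacc]
      apply List.filter_congr
      intro g hg
      by_cases hgk : g = key2
      · subst hgk
        simp [Bool.not_eq_true] at hk
        simp [hk]
      · simp [hgk]

-- A's outer removal loop computes the minimal elements of L
theorem removeOuter_eq {L : List (List Nat)} (hN : L.Nodup)
    (hP : L.Pairwise (fun x y => x.length ≤ y.length))
    (hS : ∀ x ∈ L, x.Pairwise (· < ·)) :
    ∀ (rest pre acc : List (List Nat)), L = pre ++ rest →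
      acc = L.filter (fun g => pre.all (fun y => !(subk y g) || (y == g))) →
      removeOuter rest acc = L.filter (keepb L) := by
  intro rest
  induction rest with
  | nil =>
    intro pre acc hL hacc
    have : pre = L := by rw [hL, List.append_nil]
    subst this
    rw [removeOuter, hacc]
    rfl
  | cons key1 rest' ih =>
    intro pre acc hL hacc
    rw [removeOuter]
    apply ih (pre ++ [key1])
    · rw [hL, List.append_assoc]; rfl
    · have haccN : acc.Nodup := by rw [hacc]; exact hN.filter _
      rw [removeInner_eq key1 rest' acc haccN, hacc, List.filter_filter]
      apply List.filter_congr
      intro g hg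
      have hone : (!(decide (g ∈ rest') && subk key1 g)) = (!(subk key1 g) || (key1 == g)) := by
        by_cases hsub : subk key1 g = true
        · by_cases hgk : key1 = g
          · have : g ∉ rest' := by
              intro hmem
              rw [hL] at hN
              rcases List.nodup_append.mp hN with ⟨_, h2, _⟩
              rw [List.nodup_cons] at h2
              exact h2.1 (hgk ▸ hmem)
            simp [this, hgk]
          · have : g ∈ rest' := ord_after hL hN hP hS hg hsub hgk
            simp [hsub, this, hgk]
        · simp [Bool.not_eq_true] at hsub
          simp [hsub]
      rw [hone]
      simp [List.all_append, Bool.and_comm]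

-- generic fold lemmas for the B side
theorem foldl_flatMap {α β γ : Type} (l : List α) (f : α → List β) (g : γ → β → γ) (init : γ) :
    (l.flatMap f).foldl g init = l.foldl (fun a x => (f x).foldl g a) init := by
  induction l generalizing init with
  | nil => rfl
  | cons x l ih => simp [List.flatMap_cons, List.foldl_append, ih]

theorem foldl_guard_filter {α : Type} (p : α → Bool) (q : List α → α → Bool) :
    ∀ (xs : List α) (init : List α),
      xs.foldl (fun cs y => if p y && q cs y then cs ++ [y] else cs) init
        = (xs.filter p).foldl (fun cs y => if q cs y then cs ++ [y] else cs) init := by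
  intro xs
  induction xs with
  | nil => intro init; rfl
  | cons x xs ih =>
    intro init
    cases hp : p x with
    | true =>
      rw [List.foldl_cons, List.filter_cons_of_pos hp, List.foldl_cons, hp, Bool.true_and]
      exact ih _
    | false =>
      rw [List.foldl_cons, List.filter_cons_of_neg (by simp [hp]), hp, Bool.false_and]
      simp only [Bool.false_eq_true, if_false]
      exact ih _

-- the acceptance test of B agrees with global minimality at each split point
theorem accepted_iff_keep {L pre suf : List (List Nat)} {g : List Nat}
    (hN : L.Nodup) (hP : L.Pairwise (fun x y => x.length ≤ y.length))
    (hS : ∀ x ∈ L, x.Pairwise (· < ·))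
    (hL : L = pre ++ g :: suf) :
    ((pre.filter (keepb L)).all (fun c => !(subk c g))) = keepb L g := by
  have hgL : g ∈ L := by rw [hL]; simp
  rw [Bool.eq_iff_iff]
  constructor
  · intro hall
    rw [keepb_iff]
    intro y hy hsub
    by_contra hne
    rcases exists_keep hS y.length y hy (Nat.le_refl _) with ⟨c, hcL, hkc, hcy⟩
    have hcg : subk c g = true := subk_trans hcy hsub
    have hcne : c ≠ g := by
      intro h
      exact hne (subk_antisymm (hS y hy) (hS g hgL) hsub (h ▸ hcy))
    have hcpre : c ∈ pre := ord_before hL hN hP hS hcL hcg hcne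
    have := List.all_eq_true.mp hall c (List.mem_filter.mpr ⟨hcpre, hkc⟩)
    simp [hcg] at this
  · intro hkeep
    rw [List.all_eq_true]
    intro c hc
    rcases List.mem_filter.mp hc with ⟨hcpre, hkc⟩
    simp only [Bool.not_eq_eq_eq_not, Bool.not_true]
    by_contra hsub
    simp only [Bool.not_eq_false] at hsub
    have : c = g := (keepb_iff L g).mp hkeep c (by rw [hL]; exact List.mem_append_left _ hcpre) hsub
    subst this
    rw [hL] at hN
    exact (List.disjoint_of_nodup_append hN) hcpre (by simp)

-- B's single pass computes the minimal elements of L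
theorem foldB_eq {L : List (List Nat)} (hN : L.Nodup)
    (hP : L.Pairwise (fun x y => x.length ≤ y.length))
    (hS : ∀ x ∈ L, x.Pairwise (· < ·)) :
    ∀ (pre suf : List (List Nat)), L = pre ++ suf →
      pre.foldl stepB [] = pre.filter (keepb L) := by
  intro pre
  induction pre using List.reverseRecOn with
  | nil => intro suf _; rfl
  | append_singleton pre' g ih =>
    intro suf hL
    have hL' : L = pre' ++ g :: suf := by rw [hL, List.append_assoc]; rfl
    rw [List.foldl_append, ih (g :: suf) hL']
    show stepB (pre'.filter (keepb L)) g = _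
    rw [stepB, accepted_iff_keep hN hP hS hL', List.filter_append]
    by_cases hk : keepb L g = true
    · simp [hk]
    · simp [Bool.not_eq_true] at hk
      simp [hk]

-- filter commutes with flatMap
theorem filter_flatMap {α β : Type} (l : List α) (f : α → List β) (p : β → Bool) :
    (l.flatMap f).filter p = l.flatMap (fun x => (f x).filter p) := by
  induction l with
  | nil => rfl
  | cons x l ih => simp [List.flatMap_cons, List.filter_append, ih]

-- phase 1 of A builds exactly keyList
theorem groupA_eq (relation : List (List String)) (c : Nat) :
    groupA relation c = keyList relation c := by
  unfold groupA keyList enumE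
  rw [show (fun (g : List (List Nat)) (i : Nat) =>
      (combs i (List.range c)).foldl (fun g2 ys =>
        if isUnique relation ys then g2 ++ [ys] else g2) g)
    = (fun g i => g ++ ((combs i (List.range c)).filter (isUnique relation)))
    from funext fun g => funext fun i => PySem.List.foldl_append_if_eq_filter _ _ _]
  rw [PySem.List.foldl_append_eq_flatMap, filter_flatMap]
  rfl

-- B's nested fold is the fold of stepB over keyList
theorem altfold_eq (relation : List (List String)) (c : Nat) :
    ((List.range' 1 c).foldl (fun cs i =>
      (combs i (List.range c)).foldl (fun cs2 ys =>
        if isUnique relation ys && cs2.all (fun c' => !(subk c' ys)) then cs2 ++ [ys] else cs2) cs) [])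
    = (keyList relation c).foldl stepB [] := by
  rw [← foldl_flatMap]
  unfold keyList enumE
  rw [show (fun (cs2 : List (List Nat)) (ys : List Nat) =>
      if isUnique relation ys && cs2.all (fun c' => !(subk c' ys)) then cs2 ++ [ys] else cs2)
    = (fun cs2 ys => if isUnique relation ys && (fun cs y => List.all cs fun c' => !subk c' y) cs2 ys then cs2 ++ [ys] else cs2) from rfl]
  rw [foldl_guard_filter (isUnique relation) (fun cs y => cs.all (fun c' => !(subk c' y)))]
  rfl

-- ===== VERDICT (by name: the statement is the Claim_ definition above) =====
theorem solution_spec : Claim_equal_solution := by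
  intro relation _ _
  unfold Spec_solution
  set c := (relation.headD []).length with hc
  have hN : (keyList relation c).Nodup := (enumE_nodup c).filter _
  have hP : (keyList relation c).Pairwise (fun x y => x.length ≤ y.length) :=
    (enumE_len_pairwise c).sublist List.filter_sublist
  have hS : ∀ x ∈ keyList relation c, x.Pairwise (· < ·) := by
    intro x hx
    exact mem_enumE_sorted (List.mem_of_mem_filter hx)
  have hA : removeOuter (groupA relation c) (groupA relation c)
      = (keyList relation c).filter (keepb (keyList relation c)) := by
    rw [groupA_eq]
    apply removeOuter_eq hN hP hS (keyList relation c) []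
    · rfl
    · simp
  have hB := foldB_eq hN hP hS (keyList relation c) [] (by simp)
  have h1 : solution relation
      = ((((keyList relation c).filter (keepb (keyList relation c))).length : Nat) : Int) := by
    show ((removeOuter (groupA relation c) (groupA relation c)).length : Int) = _
    rw [hA]
  have h2 : solution_alt relation
      = ((((keyList relation c).filter (keepb (keyList relation c))).length : Nat) : Int) := by
    show (((List.range' 1 c).foldl (fun cs i =>
      (combs i (List.range c)).foldl (fun cs2 ys =>
        if isUnique relation ys && cs2.all (fun c' => !(subk c' ys)) then cs2 ++ [ys] else cs2) cs) []).length : Int) = _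
    rw [altfold_eq, hB]
  rw [h1, h2]
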